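-- pv_equiv track=rewrite | github.com/Keerat-Grewal/YoutuberNetWorthCalculator | concordance.py | punctuation_removal
-- ===== SOURCE A (Python) =====
-- import string
--
-- def punctuation_removal(line):
--     """This functions takes in a line and creates a new line without any punctuation in it. It makes sure to
--     view dashes as spaces."""
--     punctuation = string.punctuation
--
--     res = ""
--
--     for i in line:
--         if i == "-":
--             res += " "
--         elif i in punctuation:
--             res += ""
--         else:
--             res += i
--
--     return res.split()
-- ===== SOURCE B (Python) =====
-- import string
--
-- def punctuation_removal(line):
--     """Single-pass tokenizer: one scan over the line with a word buffer,
--     no intermediate string and no split()."""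
--     words = []
--     current = ""
--     for ch in line:
--         if ch.isspace() or ch == "-":
--             if current:
--                 words.append(current)
--                 current = ""
--         elif ch in string.punctuation:
--             continue
--         else:
--             current += ch
--     if current:
--         words.append(current)
--     return words
-- ===== Notes on version B (the rewrite author's own statement) =====
-- stated objective: alternative
-- what changed: B replaces A's build-a-filtered-string-then-str.split() with a single-pass character tokenizer that maintains a current-word buffer and a result list, flushing the buffer on whitespace or a dash and skipping other punctuation.
import Mathlib
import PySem

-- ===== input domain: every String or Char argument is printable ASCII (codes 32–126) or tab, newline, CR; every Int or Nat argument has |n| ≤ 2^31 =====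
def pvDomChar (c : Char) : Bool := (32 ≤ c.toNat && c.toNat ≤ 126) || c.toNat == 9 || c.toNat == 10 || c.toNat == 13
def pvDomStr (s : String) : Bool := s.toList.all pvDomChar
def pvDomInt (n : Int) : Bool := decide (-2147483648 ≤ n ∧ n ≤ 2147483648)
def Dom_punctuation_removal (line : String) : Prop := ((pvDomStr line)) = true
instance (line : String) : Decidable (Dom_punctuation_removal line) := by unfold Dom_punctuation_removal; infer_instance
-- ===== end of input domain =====

-- B replaces A's build-filtered-string-then-split() with a single-pass tokenizer
-- (word buffer + result list); objective: alternative decomposition, same cost.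

-- string.punctuation as an explicit char list
def pvPunctChars : List Char := ['!','"','#','$','%','&','\'','(',')','*','+',',','-','.','/',':',';','<','=','>','?','@','[','\\',']','^','_','`','{','|','}','~']

-- ===== PORT A =====
def punctuation_removal (line : String) : List String :=
  let res : List Char :=
    line.toList.foldl (fun r c =>
      if c = '-' then r ++ [' ']
      else if pvPunctChars.contains c then r ++ []
      else r ++ [c]) []
  (PySem.Chars.split₀ res).map String.ofList

-- ===== PORT B =====
def pvTokB : List Char → List Char → List String → List String
  | [], cur, words => if cur.isEmpty then words else words ++ [String.ofList cur]
  | c :: rest, cur, words =>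
    if PySem.Chars.isspace c || c = '-' then
      if cur.isEmpty then pvTokB rest [] words
      else pvTokB rest [] (words ++ [String.ofList cur])
    else if pvPunctChars.contains c then pvTokB rest cur words
    else pvTokB rest (cur ++ [c]) words

def punctuation_removal_alt (line : String) : List String :=
  pvTokB line.toList [] []

-- ===== PRECONDITION & SPEC =====
def Spec_punctuation_removal (line : String) (out : List String) : Prop := out = punctuation_removal_alt line
instance (line : String) (out : List String) : Decidable (Spec_punctuation_removal line out) := by unfold Spec_punctuation_removal; infer_instance

-- ===== CLAIM (what is proved, stated in full; the proofs are below) =====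
def Claim_equal_punctuation_removal : Prop := ∀ (line : String), Dom_punctuation_removal line → Spec_punctuation_removal line (punctuation_removal line)

-- ===== LEMMAS AND PROOFS =====

-- A's per-character contribution to the filtered string
def pvF (c : Char) : List Char :=
  if c = '-' then [' ']
  else if pvPunctChars.contains c then []
  else [c]

lemma pvFoldA (cs : List Char) (r : List Char) :
    cs.foldl (fun r c =>
      if c = '-' then r ++ [' ']
      else if pvPunctChars.contains c then r ++ []
      else r ++ [c]) r = r ++ cs.flatMap pvF := by
  induction cs generalizing r with
  | nil => simp
  | cons c t ih =>
    simp only [List.foldl_cons, List.flatMap_cons]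
    rw [ih]
    have : (if c = '-' then r ++ [' ']
      else if pvPunctChars.contains c then r ++ []
      else r ++ [c]) = r ++ pvF c := by
      unfold pvF; split_ifs <;> simp
    rw [this, List.append_assoc]

lemma pvGoAcc (s : List Char) (cur : List Char) (acc : List (List Char)) :
    PySem.Chars.split₀.go s cur acc = acc.reverse ++ PySem.Chars.split₀.go s cur [] := by
  induction s generalizing cur acc with
  | nil =>
    simp only [PySem.Chars.split₀.go]
    split_ifs <;> simp
  | cons c t ih =>
    simp only [PySem.Chars.split₀.go]
    split_ifs with h1 h2
    · rw [ih _ acc]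
    · rw [ih _ (cur.reverse :: acc), ih _ [cur.reverse]]
      simp
    · rw [ih]

lemma pvPunctNotSpace : pvPunctChars.all (fun c => !PySem.Chars.isspace c) = true := by decide

lemma pvMain (cs cur : List Char) (words : List String) :
    pvTokB cs cur words =
      words ++ (PySem.Chars.split₀.go (cs.flatMap pvF) cur.reverse []).map String.ofList := by
  induction cs generalizing cur words with
  | nil =>
    by_cases h : cur = []
    · subst h; simp [pvTokB, PySem.Chars.split₀.go]
    · simp [pvTokB, PySem.Chars.split₀.go, h]
  | cons c t ih =>
    simp only [List.flatMap_cons]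
    by_cases hs : PySem.Chars.isspace c = true ∨ c = '-'
    · -- separator: pvF c is a single whitespace char
      obtain ⟨w, hw, hsp⟩ : ∃ w, pvF c = [w] ∧ PySem.Chars.isspace w = true := by
        rcases hs with hs | hs
        · refine ⟨c, ?_, hs⟩
          have hnp : c ∉ pvPunctChars := fun hc => by
            have := List.all_eq_true.mp pvPunctNotSpace c hc
            simp [hs] at this
          have hnd : c ≠ '-' := by rintro rfl; revert hs; decide
          simp [pvF, hnd, hnp]
        · subst hs; exact ⟨' ', by decide, by decide⟩
      have hcond : (PySem.Chars.isspace c || c = '-') = true := by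
        rcases hs with hs | hs <;> simp [hs]
      rw [hw, List.singleton_append]
      by_cases h : cur = []
      · subst h
        rw [show pvTokB (c :: t) [] words = pvTokB t [] words from by
          simp [pvTokB, hcond]]
        rw [ih]
        congr 1
        simp [PySem.Chars.split₀.go, hsp]
      · rw [show pvTokB (c :: t) cur words = pvTokB t [] (words ++ [String.ofList cur]) from by
          simp [pvTokB, hcond, h]]
        rw [show PySem.Chars.split₀.go (w :: List.flatMap pvF t) cur.reverse [] =
            PySem.Chars.split₀.go (List.flatMap pvF t) [] [cur] from by
          simp [PySem.Chars.split₀.go, hsp, h]]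
        rw [ih, pvGoAcc _ [] [cur]]
        simp
    · rw [not_or] at hs
      obtain ⟨hns, hnd⟩ := hs
      have hcond : (PySem.Chars.isspace c || c = '-') = false := by
        simp [hns, hnd]
      rw [show pvTokB (c :: t) cur words =
          (if pvPunctChars.contains c then pvTokB t cur words
           else pvTokB t (cur ++ [c]) words) from by
        simp only [pvTokB, hcond, Bool.false_eq_true, if_false]]
      by_cases hp : c ∈ pvPunctChars
      · rw [if_pos (by simpa using hp)]
        have : pvF c = [] := by simp [pvF, hnd, hp]
        rw [this, List.nil_append, ih]
      · rw [if_neg (by simpa using hp)]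
        have : pvF c = [c] := by simp [pvF, hnd, hp]
        rw [this, List.singleton_append, ih]
        congr 2
        simp [PySem.Chars.split₀.go, hns]

-- ===== VERDICT (by name: the statement is the Claim_ definition above) =====
theorem punctuation_removal_spec : Claim_equal_punctuation_removal := by
  intro line _
  unfold Spec_punctuation_removal punctuation_removal punctuation_removal_alt
  rw [pvFoldA, List.nil_append, pvMain]
  simp [PySem.Chars.split₀]
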